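-- pv_equiv track=rewrite | github.com/sgrimee/miryoku_zmk | zmk_to_pdf/src/zmk_to_pdf/layer_processor.py | create_page_groupings
-- ===== SOURCE A (Python) =====
-- def create_page_groupings(layers: list[str]) -> list[list[str]]:
--     """Group layers into pages dynamically.
--
--     - First page gets up to 4 layers, preferring TAP, NUM, SYM, NAV if present
--     - Subsequent pages get up to 4 layers each
--     - Remaining layers fill in order of appearance in config
--
--     Args:
--         layers: List of layer names to group
--
--     Returns:
--         List of pages, where each page is a list of layer names
--     """
--     preferred_first = ["TAP", "NUM", "SYM", "NAV"]
--
--     # Build first page: preferred layers first (if they exist), in preferred order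
--     page1 = [layer for layer in preferred_first if layer in layers]
--
--     # Fill remaining page1 slots with other layers (up to 4 total)
--     remaining = [layer for layer in layers if layer not in page1]
--     while len(page1) < 4 and remaining:
--         page1.append(remaining.pop(0))
--
--     # Build subsequent pages with remaining layers (4 per page)
--     pages = [page1] if page1 else []
--     while remaining:
--         page = remaining[:4]
--         remaining = remaining[4:]
--         pages.append(page)
--
--     return pages
-- ===== SOURCE B (Python) =====
-- def create_page_groupings(layers: list[str]) -> list[list[str]]:
--     """Group layers into pages of 4: preferred names first, then the rest in order."""
--     preferred = ["TAP", "NUM", "SYM", "NAV"]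
--     head = [l for l in preferred if l in layers]
--     ordered = head + [l for l in layers if l not in head]
--     return [ordered[i:i + 4] for i in range(0, len(ordered), 4)]
-- ===== Notes on version B (the rewrite author's own statement) =====
-- stated objective: simpler
-- what changed: Builds one ordered list (preferred names present, then the rest) and chunks it uniformly by index slices of 4, removing A's pop-front fill loop, the first-page special case, and A's repeated remaining[4:] re-copying.
import Mathlib
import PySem

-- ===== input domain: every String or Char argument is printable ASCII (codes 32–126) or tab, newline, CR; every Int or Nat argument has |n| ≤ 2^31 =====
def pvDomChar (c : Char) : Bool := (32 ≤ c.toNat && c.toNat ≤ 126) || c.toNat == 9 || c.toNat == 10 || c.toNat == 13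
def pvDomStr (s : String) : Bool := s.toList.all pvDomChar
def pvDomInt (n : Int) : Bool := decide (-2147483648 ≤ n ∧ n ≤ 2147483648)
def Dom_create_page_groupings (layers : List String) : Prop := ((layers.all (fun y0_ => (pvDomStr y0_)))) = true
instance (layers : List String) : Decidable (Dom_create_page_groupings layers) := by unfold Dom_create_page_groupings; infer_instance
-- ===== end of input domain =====

-- B replaces A's pop-front fill loop and first-page special case by one ordered list chunked uniformly into slices of 4 (simpler decomposition; same cost).


-- ===== PORT A =====
-- remaining[4:] is a drop of 4 (cited by pvChunkLoop's termination proof)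
theorem pvSliceFrom4 (xs : List String) : PySem.List.slice xs (some 4) none = xs.drop 4 := by
  simpa using PySem.List.slice_from_natCast xs 4

-- while len(page1) < 4 and remaining: page1.append(remaining.pop(0))
def pvFillLoop (page1 remaining : List String) : List String × List String :=
  if page1.length < 4 then
    match remaining with
    | [] => (page1, remaining)
    | r :: rs => pvFillLoop (page1 ++ [r]) rs
  else (page1, remaining)

-- while remaining: page = remaining[:4]; remaining = remaining[4:]; pages.append(page)
def pvChunkLoop (remaining : List String) (pages : List (List String)) : List (List String) :=
  match h : remaining with
  | [] => pages
  | _ :: _ =>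
      pvChunkLoop (PySem.List.slice remaining (some 4) none)
        (pages ++ [PySem.List.slice remaining none (some 4)])
termination_by remaining.length
decreasing_by simp [pvSliceFrom4, h]

def create_page_groupings (layers : List String) : List (List String) :=
  let preferred_first := ["TAP", "NUM", "SYM", "NAV"]
  let page1 := preferred_first.filter (fun layer => layers.contains layer)
  let remaining := layers.filter (fun layer => !(page1.contains layer))
  let fr := pvFillLoop page1 remaining
  let pages := if fr.1 ≠ [] then [fr.1] else []
  pvChunkLoop fr.2 pages

-- ===== PORT B =====
def create_page_groupings_alt (layers : List String) : List (List String) :=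
  let preferred := ["TAP", "NUM", "SYM", "NAV"]
  let head := preferred.filter (fun l => layers.contains l)
  let ordered := head ++ layers.filter (fun l => !(head.contains l))
  (PySem.List.pyRange 0 (ordered.length : Int) 4).map
    (fun i => PySem.List.slice ordered (some i) (some (i + 4)))

-- ===== PRECONDITION & SPEC =====
def Spec_create_page_groupings (layers : List String) (out : List (List String)) : Prop := out = create_page_groupings_alt layers
instance (layers : List String) (out : List (List String)) : Decidable (Spec_create_page_groupings layers out) := by unfold Spec_create_page_groupings; infer_instance

-- ===== CLAIM (what is proved, stated in full; the proofs are below) =====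
def Claim_equal_create_page_groupings : Prop := ∀ (layers : List String), Dom_create_page_groupings layers → Spec_create_page_groupings layers (create_page_groupings layers)

-- ===== LEMMAS AND PROOFS =====
-- common normal form of both programs: successive chunks of 4
def pvChunk4 : List String → List (List String)
  | [] => []
  | l@(_ :: _) => l.take 4 :: pvChunk4 (l.drop 4)
termination_by l => l.length
decreasing_by subst_vars; simp

theorem pvChunkLoop_eq (n : Nat) : ∀ (remaining : List String) (pages : List (List String)),
    remaining.length ≤ n → pvChunkLoop remaining pages = pages ++ pvChunk4 remaining := by
  induction n with
  | zero =>
      intro remaining pages h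
      have : remaining = [] := by simpa using List.eq_nil_of_length_eq_zero (by omega)
      subst this; rw [pvChunkLoop, pvChunk4]; simp
  | succ n ih =>
      intro remaining pages h
      match remaining with
      | [] => rw [pvChunkLoop, pvChunk4]; simp
      | a :: l =>
          rw [pvChunkLoop, pvChunk4]
          have h4 : PySem.List.slice (a :: l) none (some 4) = (a :: l).take 4 := by
            simpa using PySem.List.slice_to_natCast (a :: l) 4
          rw [pvSliceFrom4, h4, ih _ _ (by simp at h ⊢; omega)]
          simp

theorem pvFillLoop_eq (remaining : List String) : ∀ (page1 : List String), page1.length ≤ 4 →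
    pvFillLoop page1 remaining = ((page1 ++ remaining).take 4, (page1 ++ remaining).drop 4) := by
  induction remaining with
  | nil =>
      intro page1 h
      rw [pvFillLoop]
      split
      · simp [List.take_of_length_le (by omega : page1.length ≤ 4),
          List.drop_eq_nil_of_le (by omega : page1.length ≤ 4)]
      · simp [List.take_of_length_le (by omega : page1.length ≤ 4),
          List.drop_eq_nil_of_le (by omega : page1.length ≤ 4)]
  | cons r rs ih =>
      intro page1 h
      rw [pvFillLoop]
      split
      · rw [ih (page1 ++ [r]) (by simp; omega)]
        simp
      · have h4 : page1.length = 4 := by omega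
        rw [← h4]
        simp

theorem pvKey (n : Nat) : ∀ l : List String, l.length ≤ n →
    (List.range ((l.length + 3) / 4)).map (fun k => (l.drop (4 * k)).take 4) = pvChunk4 l := by
  induction n with
  | zero =>
      intro l h
      have : l = [] := List.eq_nil_of_length_eq_zero (by omega)
      subst this
      rw [pvChunk4]; simp
  | succ n ih =>
      intro l h
      match l with
      | [] => rw [pvChunk4]; simp
      | a :: t =>
          have hlen : ((a :: t).length + 3) / 4 = (((a :: t).drop 4).length + 3) / 4 + 1 := by
            simp; omega
          rw [hlen, List.range_succ_eq_map, List.map_cons, List.map_map, pvChunk4]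
          congr 1
          rw [← ih ((a :: t).drop 4) (by simp only [List.length_drop, List.length_cons] at h ⊢; omega)]
          simp only [List.length_drop]
          apply List.map_congr_left
          intro k _
          simp only [Function.comp, List.drop_drop]
          congr 2
          omega

theorem pvChunkB (l : List String) :
    (PySem.List.pyRange 0 (l.length : Int) 4).map
      (fun i => PySem.List.slice l (some i) (some (i + 4))) = pvChunk4 l := by
  rw [PySem.List.pyRange_of_pos _ _ (by norm_num), List.map_map]
  have hm : (if (0:Int) < (l.length : Int) then (((l.length : Int) - 0 + 4 - 1) / 4).toNat else 0)
      = (l.length + 3) / 4 := by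
    split_ifs <;> omega
  rw [hm, ← pvKey l.length l le_rfl]
  apply List.map_congr_left
  intro k _
  show PySem.List.slice l (some (0 + 4 * (k:Int))) (some (0 + 4 * (k:Int) + 4)) = _
  have h1 : (0 + 4 * (k:Int)) = ((4 * k : Nat) : Int) := by push_cast; ring
  rw [h1]
  have h3 := PySem.List.slice_natCast_add l (4*k) 4
  rw [show ((4:Nat):Int) = (4:Int) from rfl] at h3
  exact h3

theorem pvMain (layers : List String) :
    create_page_groupings layers = create_page_groupings_alt layers := by
  unfold create_page_groupings create_page_groupings_alt
  dsimp only
  rw [pvChunkB]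
  have hP : (List.filter (fun l => layers.contains l) ["TAP", "NUM", "SYM", "NAV"]).length ≤ 4 := by
    simpa using List.length_filter_le (fun l => layers.contains l) ["TAP", "NUM", "SYM", "NAV"]
  rw [pvFillLoop_eq _ _ hP]
  rw [pvChunkLoop_eq (List.filter (fun l => layers.contains l) ["TAP", "NUM", "SYM", "NAV"]
        ++ List.filter
            (fun l => !(List.filter (fun l => layers.contains l) ["TAP", "NUM", "SYM", "NAV"]).contains l)
            layers).length _ _ (by simp)]
  cases hpr : List.filter (fun l => layers.contains l) ["TAP", "NUM", "SYM", "NAV"]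
      ++ List.filter
          (fun l => !(List.filter (fun l => layers.contains l) ["TAP", "NUM", "SYM", "NAV"]).contains l)
          layers with
  | nil => simp [pvChunk4]
  | cons a t => rw [pvChunk4]; simp

-- ===== VERDICT (by name: the statement is the Claim_ definition above) =====
theorem create_page_groupings_spec : Claim_equal_create_page_groupings := by
  intro layers _
  exact pvMain layers
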